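-- pv_equiv track=rewrite | github.com/markli404/StateDelta | src/data.py | fetch_last_choice
-- ===== SOURCE A (Python) =====
-- def fetch_last_choice(sentence: str):
--     sentence = sentence.replace("\\", "").replace("(", " ").replace(")", " ").replace("{", " ").replace("}", " ").replace(".", " ")
--     words = sentence.split()
--     for word in words[::-1]:
--         if word.endswith("."):
--             word = word[:-1]
--         if word in ["A", "B", "C", "D"]:
--             return word
--     return None
-- ===== SOURCE B (Python) =====
-- def fetch_last_choice(sentence: str):
--     # single forward pass, streaming tokenizer with an accumulator:
--     # no replace/translate pre-pass, no split, no list of words is built.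
--     last = None
--     cur = ""
--     for c in sentence:
--         if c == "\\":
--             continue
--         if c.isspace() or c in "(){}.":
--             if cur in ("A", "B", "C", "D"):
--                 last = cur
--             cur = ""
--         else:
--             cur += c
--     if cur in ("A", "B", "C", "D"):
--         last = cur
--     return last
-- ===== Notes on version B (the rewrite author's own statement) =====
-- stated objective: alternative
-- what changed: B is a single-pass streaming tokenizer: one forward scan over the raw characters keeps a current-token accumulator and the most recent standalone choice letter, treating backslash as deleted and (){}. as separators inline, instead of A's six replace passes followed by split() into a word list and a reverse loop over it.
import Mathlib
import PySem

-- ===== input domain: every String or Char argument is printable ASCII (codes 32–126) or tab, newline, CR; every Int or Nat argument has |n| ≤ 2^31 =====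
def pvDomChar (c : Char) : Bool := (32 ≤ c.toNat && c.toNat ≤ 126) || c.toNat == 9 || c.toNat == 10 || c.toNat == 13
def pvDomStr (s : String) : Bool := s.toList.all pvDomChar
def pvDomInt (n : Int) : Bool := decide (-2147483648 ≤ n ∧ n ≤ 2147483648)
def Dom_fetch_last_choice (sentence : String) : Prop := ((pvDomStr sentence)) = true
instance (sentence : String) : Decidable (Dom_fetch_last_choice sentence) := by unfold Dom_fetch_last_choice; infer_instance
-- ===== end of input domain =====

-- B replaces A's six replace passes + split + reverse word loop by ONE forward streaming
-- pass over the characters with a current-token accumulator (objective: alternative).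

-- ===== PORT A =====
-- the reverse for-loop of A, with its (dead in context) trailing-dot strip kept literally
def fetchGoA : List String → Option String
  | [] => none
  | word :: rest =>
    let word' := if PySem.Str.endswith word "." then PySem.Str.slice word none (some (-1)) else word
    if word' ∈ ["A", "B", "C", "D"] then some word' else fetchGoA rest

def fetch_last_choice (sentence : String) : Option String :=
  let s := PySem.Str.replace (PySem.Str.replace (PySem.Str.replace (PySem.Str.replace
            (PySem.Str.replace (PySem.Str.replace sentence "\\" "") "(" " ") ")" " ")
            "{" " ") "}" " ") "." " "
  let words := PySem.Str.split₀ s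
  fetchGoA ((PySem.List.slice? words none none (-1)).getD [])

-- ===== PORT B =====
-- the single forward loop of Source B: state = (most recent standalone choice letter, current token);
-- the [] case is the after-loop final check of Source B
def fetchGoB : List Char → Option String → List Char → Option String
  | [], last, cur =>
      if String.ofList cur ∈ ["A", "B", "C", "D"] then some (String.ofList cur) else last
  | c :: t, last, cur =>
      if c = '\\' then fetchGoB t last cur
      else if PySem.Chars.isspace c = true ∨ c ∈ ['(', ')', '{', '}', '.'] then
        fetchGoB t (if String.ofList cur ∈ ["A", "B", "C", "D"] then some (String.ofList cur) else last) []
      else fetchGoB t last (cur ++ [c])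

def fetch_last_choice_alt (sentence : String) : Option String :=
  fetchGoB sentence.toList none []

-- ===== PRECONDITION & SPEC =====
def Spec_fetch_last_choice (sentence : String) (out : Option String) : Prop := out = fetch_last_choice_alt sentence
instance (sentence : String) (out : Option String) : Decidable (Spec_fetch_last_choice sentence out) := by unfold Spec_fetch_last_choice; infer_instance

-- ===== CLAIM (what is proved, stated in full; the proofs are below) =====
def Claim_equal_fetch_last_choice : Prop := ∀ (sentence : String), Dom_fetch_last_choice sentence → Spec_fetch_last_choice sentence (fetch_last_choice sentence)

-- ===== LEMMAS AND PROOFS =====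

-- proof-side description of A's cleaning chain as a per-character map (delete '\', map (){}. to ' ')
def fetchTr (c : Char) : Option Char :=
  if c = '\\' then none
  else if c = '(' ∨ c = ')' ∨ c = '{' ∨ c = '}' ∨ c = '.' then some ' '
  else some c

lemma replace_go_single (a : Char) (new : List Char) :
    ∀ (fuel : Nat) (l acc : List Char), l.length ≤ fuel →
      PySem.Chars.replace.go [a] new fuel l acc
        = acc.reverse ++ l.flatMap (fun c => if c = a then new else [c]) := by
  intro fuel
  induction fuel with
  | zero =>
    intro l acc h
    have : l = [] := List.length_eq_zero_iff.mp (Nat.le_zero.mp h)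
    subst this
    rw [PySem.Chars.replace.go.eq_def]; simp
  | succ n ih =>
    intro l acc h
    cases l with
    | nil => rw [PySem.Chars.replace.go.eq_def]; simp
    | cons c t =>
      rw [PySem.Chars.replace.go.eq_def]
      simp only [List.isPrefixOf, Bool.and_true]
      by_cases hc : c = a
      · subst hc
        simp only [beq_self_eq_true, if_true]
        rw [ih _ _ (by simpa using Nat.le_of_succ_le_succ h)]
        simp
      · have hb : (a == c) = false := beq_eq_false_iff_ne.mpr (Ne.symm hc)
        simp only [hb, Bool.false_eq_true, if_false]
        rw [ih _ _ (by simpa using Nat.le_of_succ_le_succ h)]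
        simp [hc]

lemma replace_single (cs : List Char) (a : Char) (new : List Char) :
    PySem.Chars.replace cs [a] new = cs.flatMap (fun c => if c = a then new else [c]) := by
  rw [PySem.Chars.replace]
  simp only [List.isEmpty_cons, Bool.false_eq_true, if_false]
  simpa using replace_go_single a new cs.length cs [] (le_refl _)

-- the chain of six single-character replaces equals one filterMap over fetchTr
lemma chain_eq (cs : List Char) :
    PySem.Chars.replace (PySem.Chars.replace (PySem.Chars.replace (PySem.Chars.replace
      (PySem.Chars.replace (PySem.Chars.replace cs ['\\'] []) ['('] [' ']) [')'] [' '])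
      ['{'] [' ']) ['}'] [' ']) ['.'] [' '] = cs.filterMap fetchTr := by
  simp only [replace_single]
  induction cs with
  | nil => simp
  | cons c t ih =>
    by_cases h1 : c = '\\'
    · subst h1; simpa [fetchTr] using ih
    by_cases h2 : c = '('
    · subst h2; simpa [fetchTr] using ih
    by_cases h3 : c = ')'
    · subst h3; simpa [fetchTr] using ih
    by_cases h4 : c = '{'
    · subst h4; simpa [fetchTr] using ih
    by_cases h5 : c = '}'
    · subst h5; simpa [fetchTr] using ih
    by_cases h6 : c = '.'
    · subst h6; simpa [fetchTr] using ih
    · simp [fetchTr, h1, h2, h3, h4, h5, h6, ih]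

lemma no_dot (cs : List Char) : '.' ∉ cs.filterMap fetchTr := by
  intro hmem
  rcases List.mem_filterMap.mp hmem with ⟨a, _, ha⟩
  unfold fetchTr at ha
  split_ifs at ha with hA hB <;>
    first
      | exact hB (Or.inr (Or.inr (Or.inr (Or.inr (Option.some.inj ha)))))
      | exact absurd (Option.some.inj ha) (by decide)

lemma split₀_go_nil (cur : List Char) (acc : List (List Char)) :
    PySem.Chars.split₀.go [] cur acc
      = if cur.isEmpty then acc.reverse else (cur.reverse :: acc).reverse := by
  rw [PySem.Chars.split₀.go.eq_def]

lemma split₀_go_cons (c : Char) (rest cur : List Char) (acc : List (List Char)) :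
    PySem.Chars.split₀.go (c :: rest) cur acc
      = if PySem.Chars.isspace c then
          (if cur.isEmpty then PySem.Chars.split₀.go rest [] acc
           else PySem.Chars.split₀.go rest [] (cur.reverse :: acc))
        else PySem.Chars.split₀.go rest (c :: cur) acc := by
  rw [PySem.Chars.split₀.go.eq_def]

-- the accumulator of split₀.go prepends
lemma split₀_go_acc :
    ∀ (s cur : List Char) (acc : List (List Char)),
      PySem.Chars.split₀.go s cur acc = acc.reverse ++ PySem.Chars.split₀.go s cur [] := by
  intro s
  induction s with
  | nil =>
    intro cur acc
    rw [split₀_go_nil, split₀_go_nil]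
    by_cases h : cur.isEmpty
    · rw [if_pos h, if_pos h]; simp
    · rw [if_neg h, if_neg h]; simp
  | cons c rest ih =>
    intro cur acc
    rw [split₀_go_cons, split₀_go_cons]
    by_cases h1 : PySem.Chars.isspace c
    · rw [if_pos h1, if_pos h1]
      by_cases h2 : cur.isEmpty
      · rw [if_pos h2, if_pos h2]
        exact ih [] acc
      · rw [if_neg h2, if_neg h2]
        rw [ih [] (cur.reverse :: acc), ih [] [cur.reverse]]
        simp
    · rw [if_neg h1, if_neg h1]
      exact ih (c :: cur) acc

-- every character of every word produced by split₀ occurs in the source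
lemma split₀_go_chars :
    ∀ (s cur : List Char) (acc : List (List Char)) (w : List Char),
      w ∈ PySem.Chars.split₀.go s cur acc →
      ∀ c ∈ w, c ∈ s ∨ c ∈ cur ∨ ∃ u ∈ acc, c ∈ u := by
  intro s
  induction s with
  | nil =>
    intro cur acc w hw c hc
    rw [split₀_go_nil] at hw
    split_ifs at hw with h
    · exact Or.inr (Or.inr ⟨w, List.mem_reverse.mp hw, hc⟩)
    · rcases List.mem_cons.mp (List.mem_reverse.mp hw) with rfl | hw
      · exact Or.inr (Or.inl (List.mem_reverse.mp hc))
      · exact Or.inr (Or.inr ⟨w, hw, hc⟩)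
  | cons d rest ih =>
    intro cur acc w hw c hc
    rw [split₀_go_cons] at hw
    split_ifs at hw with h1 h2
    · rcases ih _ _ _ hw c hc with h | h | ⟨u, hu, hcu⟩
      · exact Or.inl (List.mem_cons_of_mem _ h)
      · cases h
      · exact Or.inr (Or.inr ⟨u, hu, hcu⟩)
    · rcases ih _ _ _ hw c hc with h | h | ⟨u, hu, hcu⟩
      · exact Or.inl (List.mem_cons_of_mem _ h)
      · cases h
      · rcases List.mem_cons.mp hu with rfl | hu
        · exact Or.inr (Or.inl (List.mem_reverse.mp hcu))
        · exact Or.inr (Or.inr ⟨u, hu, hcu⟩)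
    · rcases ih _ _ _ hw c hc with h | h | ⟨u, hu, hcu⟩
      · exact Or.inl (List.mem_cons_of_mem _ h)
      · rcases List.mem_cons.mp h with rfl | h
        · exact Or.inl (List.mem_cons_self)
        · exact Or.inr (Or.inl h)
      · exact Or.inr (Or.inr ⟨u, hu, hcu⟩)

lemma split₀_chars (cs w : List Char) (hw : w ∈ PySem.Chars.split₀ cs) :
    ∀ c ∈ w, c ∈ cs := by
  intro c hc
  rcases split₀_go_chars cs [] [] w hw c hc with h | h | ⟨u, hu, _⟩
  · exact h
  · cases h
  · cases hu

lemma endswith_dot_false (w : String) (h : '.' ∉ w.toList) :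
    PySem.Str.endswith w "." = false := by
  by_contra hne
  have ht : PySem.Str.endswith w "." = true := by
    cases hb : PySem.Str.endswith w "." with
    | false => exact absurd hb hne
    | true => rfl
  rw [PySem.Str.endswith_eq] at ht
  have := (PySem.Chars.endswith_iff _ _).mp ht
  exact h (this.subset (by simp))

lemma goA_eq_filter (m : List String)
    (h : ∀ w ∈ m, PySem.Str.endswith w "." = false) :
    fetchGoA m = (m.filter (fun w => decide (w ∈ ["A", "B", "C", "D"]))).head? := by
  induction m with
  | nil => rfl
  | cons w rest ih =>
    rw [fetchGoA]
    simp only [h w List.mem_cons_self, Bool.false_eq_true, if_false]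
    by_cases hm : w ∈ ["A", "B", "C", "D"]
    · rw [List.filter_cons_of_pos (by simpa using hm)]
      simp [hm]
    · rw [List.filter_cons_of_neg (by simpa using hm)]
      simp only [hm, if_false]
      exact ih (fun u hu => h u (List.mem_cons_of_mem _ hu))

lemma getLast?_cons_or (a : String) (l : List String) :
    (a :: l).getLast? = l.getLast?.or (some a) := by
  rw [show a :: l = [a] ++ l from rfl, List.getLast?_append]; rfl

-- B's streaming loop computes the last filtered word of the cleaned, split string
lemma goB_eq :
    ∀ (cs : List Char) (last : Option String) (cur : List Char),
      fetchGoB cs last cur =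
        Option.or ((((PySem.Chars.split₀.go (cs.filterMap fetchTr) cur.reverse []).filter
            (fun w => decide (String.ofList w ∈ (["A", "B", "C", "D"] : List String)))).map
            String.ofList).getLast?) last := by
  intro cs
  induction cs with
  | nil =>
    intro last cur
    rw [fetchGoB]
    simp only [List.filterMap_nil]
    rw [split₀_go_nil]
    cases cur with
    | nil => simp
    | cons x xs =>
      rw [if_neg (by simp : ¬ ((x :: xs).reverse.isEmpty = true))]
      simp only [List.reverse_reverse, List.reverse_singleton]
      by_cases hP : String.ofList (x :: xs) ∈ (["A", "B", "C", "D"] : List String)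
      · rw [if_pos hP, List.filter_cons_of_pos (by exact decide_eq_true hP)]
        simp [Option.some_or]
      · rw [if_neg hP, List.filter_cons_of_neg (by exact fun h => hP (of_decide_eq_true h))]
        simp [Option.none_or]
  | cons c t ih =>
    intro last cur
    rw [fetchGoB]
    by_cases h1 : c = '\\'
    · subst h1
      simp only [if_true, List.filterMap_cons]
      rw [show fetchTr '\\' = none from rfl]
      exact ih last cur
    · simp only [h1, if_false]
      by_cases h2 : PySem.Chars.isspace c = true ∨ c ∈ ['(', ')', '{', '}', '.']
      · rw [if_pos h2]
        -- the cleaned stream starts with a whitespace character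
        have hclean : (c :: t).filterMap fetchTr = (if c ∈ ['(', ')', '{', '}', '.'] then ' ' else c) :: t.filterMap fetchTr := by
          by_cases hm : c ∈ ['(', ')', '{', '}', '.']
          · simp only [hm, if_true, List.filterMap_cons]
            have : fetchTr c = some ' ' := by
              unfold fetchTr
              simp only [h1, if_false]
              rw [if_pos (by simpa using hm)]
            rw [this]
          · simp only [hm, if_false, List.filterMap_cons]
            have : fetchTr c = some c := by
              unfold fetchTr
              simp only [h1, if_false]
              rw [if_neg (by simpa using hm)]
            rw [this]
        have hsp : PySem.Chars.isspace (if c ∈ ['(', ')', '{', '}', '.'] then ' ' else c) = true := by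
          by_cases hm : c ∈ ['(', ')', '{', '}', '.']
          · rw [if_pos hm]; decide
          · rw [if_neg hm]
            rcases h2 with h | h
            · exact h
            · exact absurd h hm
        rw [hclean, split₀_go_cons, if_pos hsp]
        cases cur with
        | nil =>
          rw [if_pos (by simp : (([] : List Char).reverse.isEmpty = true))]
          rw [if_neg (by decide : ¬ (String.ofList ([] : List Char) ∈ (["A", "B", "C", "D"] : List String)))]
          exact ih last []
        | cons x xs =>
          rw [if_neg (by simp : ¬ ((x :: xs).reverse.isEmpty = true))]
          rw [split₀_go_acc (t.filterMap fetchTr) [] [(x :: xs).reverse.reverse]]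
          simp only [List.reverse_reverse, List.reverse_singleton, List.singleton_append]
          by_cases hP : String.ofList (x :: xs) ∈ (["A", "B", "C", "D"] : List String)
          · rw [if_pos hP, ih (some (String.ofList (x :: xs))) []]
            rw [List.filter_cons_of_pos (by exact decide_eq_true hP), List.map_cons, getLast?_cons_or,
              Option.or_assoc, Option.some_or]
            simp only [List.reverse_nil]
          · rw [if_neg hP, ih last []]
            rw [List.filter_cons_of_neg (by exact fun h => hP (of_decide_eq_true h))]
            simp only [List.reverse_nil]
      · rw [if_neg h2]
        have hmem : c ∉ ['(', ')', '{', '}', '.'] := fun hm => h2 (Or.inr hm)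
        have hsp : PySem.Chars.isspace c = false := by
          cases hb : PySem.Chars.isspace c with
          | false => rfl
          | true => exact absurd (Or.inl hb) h2
        have hclean : (c :: t).filterMap fetchTr = c :: t.filterMap fetchTr := by
          simp only [List.filterMap_cons]
          have : fetchTr c = some c := by
            unfold fetchTr
            simp only [h1, if_false]
            rw [if_neg (by simpa using hmem)]
          rw [this]
        rw [hclean, split₀_go_cons, if_neg (by simp [hsp])]
        rw [show c :: cur.reverse = (cur ++ [c]).reverse by simp]
        exact ih last (cur ++ [c])

-- ===== VERDICT (by name: the statement is the Claim_ definition above) =====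
theorem fetch_last_choice_spec : Claim_equal_fetch_last_choice := by
  intro sentence _
  unfold Spec_fetch_last_choice fetch_last_choice fetch_last_choice_alt
  simp only [PySem.List.slice?_none_none_neg_one, Option.getD_some]
  -- A's cleaned string is the per-character translation of the input
  have hclean :
      (PySem.Str.replace (PySem.Str.replace (PySem.Str.replace (PySem.Str.replace
        (PySem.Str.replace (PySem.Str.replace sentence "\\" "") "(" " ") ")" " ")
        "{" " ") "}" " ") "." " ")
      = String.ofList (sentence.toList.filterMap fetchTr) := by
    rw [← String.toList_inj]
    have e1 : ("\\" : String).toList = ['\\'] := by decide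
    have e2 : ("(" : String).toList = ['('] := by decide
    have e3 : (")" : String).toList = [')'] := by decide
    have e4 : ("{" : String).toList = ['{'] := by decide
    have e5 : ("}" : String).toList = ['}'] := by decide
    have e6 : ("." : String).toList = ['.'] := by decide
    have e7 : ("" : String).toList = [] := by decide
    have e8 : (" " : String).toList = [' '] := by decide
    simp only [PySem.Str.toList_replace, String.toList_ofList, e1, e2, e3, e4, e5, e6, e7, e8]
    exact chain_eq sentence.toList
  rw [hclean]
  set cleaned := String.ofList (sentence.toList.filterMap fetchTr) with hcl
  have hctl : cleaned.toList = sentence.toList.filterMap fetchTr := by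
    rw [hcl]; simp
  have hnodot : ∀ w ∈ PySem.Str.split₀ cleaned, PySem.Str.endswith w "." = false := by
    intro w hw
    apply endswith_dot_false
    intro hdot
    have hwl : w.toList ∈ PySem.Chars.split₀ cleaned.toList := by
      rw [← PySem.Str.split₀_map_toList]
      exact List.mem_map_of_mem hw
    have hmem : ('.' : Char) ∈ cleaned.toList := split₀_chars _ _ hwl _ hdot
    rw [hctl] at hmem
    exact no_dot sentence.toList hmem
  have hrev : ∀ w ∈ (PySem.Str.split₀ cleaned).reverse, PySem.Str.endswith w "." = false := by
    intro w hw; exact hnodot w (List.mem_reverse.mp hw)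
  rw [goA_eq_filter _ hrev, List.filter_reverse, List.head?_reverse]
  -- B's side: streaming loop = last filtered word of the cleaned split
  rw [goB_eq sentence.toList none []]
  have hgo : PySem.Chars.split₀.go (sentence.toList.filterMap fetchTr) ([] : List Char).reverse []
      = PySem.Chars.split₀ (sentence.toList.filterMap fetchTr) := rfl
  rw [hgo]
  have hsplit : PySem.Chars.split₀ (sentence.toList.filterMap fetchTr)
      = (PySem.Str.split₀ cleaned).map String.toList := by
    rw [← hctl]
    exact (PySem.Str.split₀_map_toList cleaned).symm
  rw [hsplit, List.filter_map, List.map_map, List.getLast?_map]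
  have hfil : ((PySem.Str.split₀ cleaned).filter
        ((fun w => decide (String.ofList w ∈ (["A", "B", "C", "D"] : List String))) ∘ String.toList))
      = (PySem.Str.split₀ cleaned).filter (fun w => decide (w ∈ (["A", "B", "C", "D"] : List String))) := by
    apply List.filter_congr
    intro w _
    simp [String.ofList_toList]
  rw [hfil]
  cases hlast : ((PySem.Str.split₀ cleaned).filter
      (fun w => decide (w ∈ (["A", "B", "C", "D"] : List String)))).getLast? with
  | none => simp
  | some v =>
    have hv : v ∈ (PySem.Str.split₀ cleaned).filter (fun w => decide (w ∈ (["A", "B", "C", "D"] : List String))) :=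
      List.mem_of_getLast? hlast
    simp [String.ofList_toList]
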